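-- pv_equiv track=rewrite | github.com/rohde01/field-schedule | feasability.py | build_team_constraints
-- ===== SOURCE A (Python) =====
-- def build_team_constraints(filtered_teams, year_constraints):
--     """Builds team-specific constraints based on the year constraints."""
--     team_constraints = []
--     team_constraint_to_team = []
--     team_constraints_indices_per_team = [[] for _ in filtered_teams]
--     for t_idx, team in enumerate(filtered_teams):
--         team_year = team['year']
--         constraints = year_constraints[team_year]
--         for constraint in constraints:
--             tc_index = len(team_constraints)
--             team_constraints.append({
--                 'team_index': t_idx,
--                 'required_size': constraint['required_size'],
--                 'sessions_required': constraint['sessions'],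
--                 'length': constraint['length']
--             })
--             team_constraint_to_team.append(t_idx)
--             team_constraints_indices_per_team[t_idx].append(tc_index)
--     return team_constraints, team_constraint_to_team, team_constraints_indices_per_team
-- ===== SOURCE B (Python) =====
-- def build_team_constraints(filtered_teams, year_constraints):
--     """Builds team-specific constraints based on the year constraints."""
--     blocks = [year_constraints[team['year']] for team in filtered_teams]
--     counts = [len(b) for b in blocks]
--     team_constraints = [
--         {
--             'team_index': t,
--             'required_size': c['required_size'],
--             'sessions_required': c['sessions'],
--             'length': c['length'],
--         }
--         for t, cs in enumerate(blocks)
--         for c in cs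
--     ]
--     team_constraint_to_team = [t for t, n in enumerate(counts) for _ in range(n)]
--     offsets = [0]
--     for n in counts:
--         offsets.append(offsets[-1] + n)
--     team_constraints_indices_per_team = [
--         list(range(a, b)) for a, b in zip(offsets, offsets[1:])
--     ]
--     return team_constraints, team_constraint_to_team, team_constraints_indices_per_team
-- ===== Notes on version B (the rewrite author's own statement) =====
-- stated objective: alternative
-- what changed: B replaces A's incremental bookkeeping (appending to team_constraint_to_team and mutating per-team buckets inside the nested loop) with arithmetic: it takes each team's constraint-block length, builds team_constraint_to_team by repeating each team index count-many times, and builds the per-team index buckets as contiguous ranges from a prefix-sum offsets table, since each team's constraints occupy a contiguous block of indices.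
import Mathlib
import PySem

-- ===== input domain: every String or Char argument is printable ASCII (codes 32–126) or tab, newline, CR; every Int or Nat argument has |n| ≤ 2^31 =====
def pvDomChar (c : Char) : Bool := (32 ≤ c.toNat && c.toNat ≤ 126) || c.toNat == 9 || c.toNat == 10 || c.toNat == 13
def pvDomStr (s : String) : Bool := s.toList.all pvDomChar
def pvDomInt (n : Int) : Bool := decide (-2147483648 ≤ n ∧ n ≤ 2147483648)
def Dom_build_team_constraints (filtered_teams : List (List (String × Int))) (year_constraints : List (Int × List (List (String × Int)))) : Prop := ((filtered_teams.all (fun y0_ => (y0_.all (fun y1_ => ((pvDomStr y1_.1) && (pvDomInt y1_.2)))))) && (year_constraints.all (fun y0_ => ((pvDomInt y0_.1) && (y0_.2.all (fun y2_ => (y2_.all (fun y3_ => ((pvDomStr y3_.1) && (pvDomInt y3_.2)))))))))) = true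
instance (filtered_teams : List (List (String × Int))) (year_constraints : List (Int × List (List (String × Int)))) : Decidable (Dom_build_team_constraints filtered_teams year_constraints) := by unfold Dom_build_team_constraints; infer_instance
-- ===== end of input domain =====

-- B replaces A's incremental bookkeeping with arithmetic: team_constraint_to_team by repeating
-- each team index count-many times, and per-team index buckets as contiguous ranges from a
-- prefix-sum offsets table — alternative decomposition, same cost.


-- shared record/lookup helpers (both Pythons build this same record dict and do these lookups)
def pvRec (i : Int) (c : List (String × Int)) : List (String × Int) :=
  [("team_index", i),
   ("required_size", (PySem.Dict.mk c).getD "required_size" 0),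
   ("sessions_required", (PySem.Dict.mk c).getD "sessions" 0),
   ("length", (PySem.Dict.mk c).getD "length" 0)]

-- year_constraints[team['year']]; Pre_ guarantees both keys are present, so the defaults are never read
def pvBlock (year_constraints : List (Int × List (List (String × Int)))) (team : List (String × Int)) : List (List (String × Int)) :=
  (PySem.Dict.mk year_constraints).getD ((PySem.Dict.mk team).getD "year" 0) []

-- ===== PORT A =====
-- literal port of A's single nested loop mutating all three accumulators; t_idx.toNat is exact
-- (enumerate indices are ≥ 0)
def build_team_constraints (filtered_teams : List (List (String × Int))) (year_constraints : List (Int × List (List (String × Int)))) : (List (List (String × Int))) × List Int × List (List Int) :=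
  (PySem.List.enumerate filtered_teams).foldl
    (fun st p =>
      (pvBlock year_constraints p.2).foldl
        (fun st c =>
          let tc_index : Int := (st.1.length : Int)
          ( st.1 ++ [pvRec p.1 c],
            st.2.1 ++ [p.1],
            st.2.2.modify p.1.toNat (· ++ [tc_index]) ) )
        st )
    (([], [], filtered_teams.map (fun _ => ([] : List Int))))

-- ===== PORT B =====
-- literal port of Source B: blocks, counts, flat record list, repetition list, prefix-sum offsets
-- (offsets[-1] = pyGet? offsets (-1); offsets[1:] = drop 1, exact since the slice has no bounds tricks)
def build_team_constraints_alt (filtered_teams : List (List (String × Int))) (year_constraints : List (Int × List (List (String × Int)))) : (List (List (String × Int))) × List Int × List (List Int) :=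
  let blocks := filtered_teams.map (pvBlock year_constraints)
  let counts := blocks.map (fun b => (b.length : Int))
  let team_constraints := (PySem.List.enumerate blocks).flatMap (fun p => p.2.map (pvRec p.1))
  let team_constraint_to_team := (PySem.List.enumerate counts).flatMap (fun p => (PySem.List.pyRange 0 p.2 1).map (fun _ => p.1))
  let offsets := counts.foldl (fun os n => os ++ [(PySem.List.pyGet? os (-1)).getD 0 + n]) [0]
  let team_constraints_indices_per_team := (offsets.zip (offsets.drop 1)).map (fun q => PySem.List.pyRange q.1 q.2 1)
  (team_constraints, team_constraint_to_team, team_constraints_indices_per_team)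

-- ===== PRECONDITION & SPEC =====
-- Pre_ excludes exactly the inputs where the Python raises KeyError: a team without a
-- 'year' key, a team year absent from year_constraints, or a constraint record missing
-- 'required_size'/'sessions'/'length'.
def Pre_build_team_constraints (filtered_teams : List (List (String × Int))) (year_constraints : List (Int × List (List (String × Int)))) : Prop :=
  ∀ team ∈ filtered_teams,
    ((PySem.Dict.mk team).get? "year").isSome = true ∧
    ((PySem.Dict.mk year_constraints).get? ((PySem.Dict.mk team).getD "year" 0)).isSome = true ∧
    ∀ c ∈ (PySem.Dict.mk year_constraints).getD ((PySem.Dict.mk team).getD "year" 0) [],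
      ((PySem.Dict.mk c).get? "required_size").isSome = true ∧
      ((PySem.Dict.mk c).get? "sessions").isSome = true ∧
      ((PySem.Dict.mk c).get? "length").isSome = true
instance (filtered_teams : List (List (String × Int))) (year_constraints : List (Int × List (List (String × Int)))) : Decidable (Pre_build_team_constraints filtered_teams year_constraints) := by unfold Pre_build_team_constraints; infer_instance

def pvWitness_build_team_constraints : (List (List (String × Int))) × (List (Int × List (List (String × Int)))) :=
  ([[("year", 0)], [("year", 1)]],
   [(0, [[("required_size", 5), ("sessions", 2), ("length", 1)]]),
    (1, [])])

def Spec_build_team_constraints (filtered_teams : List (List (String × Int))) (year_constraints : List (Int × List (List (String × Int)))) (out : (List (List (String × Int))) × List Int × List (List Int)) : Prop := out = build_team_constraints_alt filtered_teams year_constraints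
instance (filtered_teams : List (List (String × Int))) (year_constraints : List (Int × List (List (String × Int)))) (out : (List (List (String × Int))) × List Int × List (List Int)) : Decidable (Spec_build_team_constraints filtered_teams year_constraints out) := by unfold Spec_build_team_constraints; infer_instance

-- ===== CLAIM (what is proved, stated in full; the proofs are below) =====
def Claim_equal_build_team_constraints : Prop := ∀ (filtered_teams : List (List (String × Int))) (year_constraints : List (Int × List (List (String × Int)))), Dom_build_team_constraints filtered_teams year_constraints → Pre_build_team_constraints filtered_teams year_constraints → Spec_build_team_constraints filtered_teams year_constraints (build_team_constraints filtered_teams year_constraints)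

-- ===== LEMMAS AND PROOFS =====

-- prefix sums of counts starting from a (the tail of B's offsets list)
def pvSums (a : Int) : List Int → List Int
  | [] => []
  | n :: ns => (a + n) :: pvSums (a + n) ns

-- the list of contiguous index ranges: bucket for each count, starting at a
def pvR (a : Int) : List Int → List (List Int)
  | [] => []
  | n :: ns => PySem.List.pyRange a (a + n) 1 :: pvR (a + n) ns

lemma pv_modify_at_append {α : Type} (P : List α) (x : α) (r : List α) (f : α → α) :
    (P ++ x :: r).modify P.length f = P ++ f x :: r := by
  induction P with
  | nil => simp [List.modify_zero_cons]
  | cons y P ih => simp [List.modify_succ_cons, ih]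

-- A's inner loop over one team's constraints, from an arbitrary state
lemma pv_inner (i : Int) :
    ∀ (cs : List (List (String × Int))) (tc : List (List (String × Int))) (m : List Int) (bk : List (List Int)),
    cs.foldl
        (fun st c =>
          let tc_index : Int := (st.1.length : Int)
          ( st.1 ++ [pvRec i c],
            st.2.1 ++ [i],
            st.2.2.modify i.toNat (· ++ [tc_index]) ) )
        (tc, m, bk)
      = (tc ++ cs.map (pvRec i),
         m ++ List.replicate cs.length i,
         bk.modify i.toNat (· ++ PySem.List.pyRange (tc.length : Int) ((tc.length : Int) + cs.length) 1)) := by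
  intro cs
  induction cs with
  | nil =>
    intro tc m bk
    simp only [List.foldl_nil, List.map_nil, List.length_nil, List.replicate_zero,
      Nat.cast_zero, add_zero, PySem.List.pyRange_one_eq_nil (le_refl ((tc.length : Int))),
      List.append_nil]
    rw [show (fun x : List Int => x) = id from rfl, List.modify_id]
  | cons c cs ih =>
    intro tc m bk
    simp only [List.foldl_cons]
    rw [ih, List.modify_modify_eq]
    simp only [Prod.mk.injEq]
    refine ⟨by simp, by simp [List.replicate_succ], ?_⟩
    congr 1
    funext x
    simp only [Function.comp_apply, List.append_assoc, List.singleton_append]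
    have hl : (((tc ++ [pvRec i c]).length : Nat) : Int) = (tc.length : Int) + 1 := by
      simp
    rw [hl]
    have hB : (tc.length : Int) + 1 + (cs.length : Int)
        = (tc.length : Int) + (((c :: cs).length : Nat) : Int) := by simp; omega
    rw [hB, ← PySem.List.pyRange_one_cons (by simp :
        (tc.length : Int) < (tc.length : Int) + (((c :: cs).length : Nat) : Int))]

lemma pv_outer (year_constraints : List (Int × List (List (String × Int)))) :
    ∀ (ts : List (List (String × Int))) (P : List (List Int)) (tc : List (List (String × Int))) (m : List Int),
    (PySem.List.enumerate ts (P.length : Int)).foldl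
      (fun st p =>
        (pvBlock year_constraints p.2).foldl
          (fun st c =>
            let tc_index : Int := (st.1.length : Int)
            ( st.1 ++ [pvRec p.1 c],
              st.2.1 ++ [p.1],
              st.2.2.modify p.1.toNat (· ++ [tc_index]) ) )
          st )
      (tc, m, P ++ ts.map (fun _ => ([] : List Int)))
    = (tc ++ (PySem.List.enumerate ts (P.length : Int)).flatMap (fun p => (pvBlock year_constraints p.2).map (pvRec p.1)),
       m ++ (PySem.List.enumerate ts (P.length : Int)).flatMap (fun p => List.replicate (pvBlock year_constraints p.2).length p.1),
       P ++ pvR (tc.length : Int) (ts.map (fun t => ((pvBlock year_constraints t).length : Int)))) := by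
  intro ts
  induction ts with
  | nil => intro P tc m; simp [PySem.List.enumerate_nil, pvR]
  | cons t ts ih =>
    intro P tc m
    simp only [PySem.List.enumerate_cons, List.foldl_cons, List.flatMap_cons, List.map_cons]
    rw [pv_inner]
    have htoNat : ((P.length : Int)).toNat = P.length := by simp
    rw [htoNat]
    have hmod : (P ++ ([] : List Int) :: ts.map (fun _ => ([] : List Int))).modify P.length
        (· ++ PySem.List.pyRange (tc.length : Int) ((tc.length : Int) + (pvBlock year_constraints t).length) 1)
        = (P ++ [PySem.List.pyRange (tc.length : Int) ((tc.length : Int) + (pvBlock year_constraints t).length) 1])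
            ++ ts.map (fun _ => ([] : List Int)) := by
      rw [pv_modify_at_append]; simp
    rw [hmod]
    have hP1 : (((P ++ [PySem.List.pyRange (tc.length : Int) ((tc.length : Int) + (pvBlock year_constraints t).length) 1]).length : Nat) : Int) = (P.length : Int) + 1 := by
      simp
    have := ih (P ++ [PySem.List.pyRange (tc.length : Int) ((tc.length : Int) + (pvBlock year_constraints t).length) 1])
      (tc ++ (pvBlock year_constraints t).map (pvRec (P.length : Int)))
      (m ++ List.replicate (pvBlock year_constraints t).length (P.length : Int))
    rw [hP1] at this
    rw [this]
    have hlen2 : (((tc ++ (pvBlock year_constraints t).map (pvRec (P.length : Int))).length : Nat) : Int)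
        = (tc.length : Int) + ((pvBlock year_constraints t).length : Int) := by
      simp
    rw [hlen2]
    simp [pvR, List.append_assoc]

-- enumerate over a mapped list
lemma pv_enumerate_map {α β : Type} (f : α → β) :
    ∀ (ts : List α) (s : Int),
    PySem.List.enumerate (ts.map f) s = (PySem.List.enumerate ts s).map (fun p => (p.1, f p.2)) := by
  intro ts
  induction ts with
  | nil => intro s; simp [PySem.List.enumerate_nil]
  | cons t ts ih => intro s; simp [PySem.List.enumerate_cons, ih]

-- range(n) mapped to a constant is a replicate
lemma pv_map_const_pyRange (n : Nat) (i : Int) :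
    (PySem.List.pyRange 0 (n : Int) 1).map (fun _ => i) = List.replicate n i := by
  have h := PySem.List.length_pyRange_one 0 (n : Int)
  rw [List.map_const', h]
  simp

-- B's offsets loop is [start state] followed by prefix sums of its last element
lemma pv_offsets :
    ∀ (ns : List Int) (os : List Int) (a : Int),
    ns.foldl (fun os n => os ++ [(PySem.List.pyGet? os (-1)).getD 0 + n]) (os ++ [a])
      = os ++ [a] ++ pvSums a ns := by
  intro ns
  induction ns with
  | nil => intro os a; simp [pvSums]
  | cons n ns ih =>
    intro os a
    simp only [List.foldl_cons, PySem.List.pyGet?_neg_one_append_singleton, Option.getD_some]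
    rw [List.append_assoc, ← List.append_assoc os [a] [a + n]]
    have := ih (os ++ [a]) (a + n)
    rw [this]
    simp [pvSums, List.append_assoc]

-- zipping offsets with their tail and taking ranges gives the bucket list
lemma pv_zipR :
    ∀ (ns : List Int) (a : Int),
    ((a :: pvSums a ns).zip (pvSums a ns)).map (fun q => PySem.List.pyRange q.1 q.2 1) = pvR a ns := by
  intro ns
  induction ns with
  | nil => intro a; simp [pvSums, pvR]
  | cons n ns ih =>
    intro a
    simp only [pvSums, pvR, List.zip_cons_cons, List.map_cons]
    exact congrArg _ (ih (a + n))

-- ===== VERDICT (by name: the statement is the Claim_ definition above) =====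
theorem build_team_constraints_spec : Claim_equal_build_team_constraints := by
  intro filtered_teams year_constraints _ _
  unfold Spec_build_team_constraints build_team_constraints build_team_constraints_alt
  have hA := pv_outer year_constraints filtered_teams [] [] []
  simp only [List.length_nil, Nat.cast_zero, List.nil_append] at hA
  rw [hA]
  dsimp only
  have hoff := pv_offsets
    ((filtered_teams.map (pvBlock year_constraints)).map (fun b => (b.length : Int))) [] 0
  simp only [List.nil_append] at hoff
  rw [hoff]
  have hzip := pv_zipR ((filtered_teams.map (pvBlock year_constraints)).map (fun b => (b.length : Int))) 0
  simp only [List.singleton_append, List.drop_succ_cons, List.drop_zero] at *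
  rw [hzip]
  simp only [pv_enumerate_map, List.flatMap_map, List.map_map, Function.comp_def,
    pv_map_const_pyRange]
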